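-- pv_equiv track=rewrite | github.com/OtazuGIT/App_lab_clinic | main_window.py | _split_reference_segments
-- ===== SOURCE A (Python) =====
-- def _split_reference_segments(reference_text):
--     segments = []
--     for raw_line in str(reference_text).split('\n'):
--         for part in raw_line.split('|'):
--             cleaned = part.strip()
--             if cleaned:
--                 segments.append(cleaned)
--     return segments or [str(reference_text).strip()]
-- ===== SOURCE B (Python) =====
-- def _split_reference_segments(reference_text):
--     text = str(reference_text)
--     segments = []
--     cur = []
--     for ch in text:
--         if ch == '\n' or ch == '|':
--             cleaned = ''.join(cur).strip()
--             if cleaned: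
--                 segments.append(cleaned)
--             cur = []
--         else:
--             cur.append(ch)
--     cleaned = ''.join(cur).strip()
--     if cleaned:
--         segments.append(cleaned)
--     return segments if segments else [text.strip()]
-- ===== Notes on version B (the rewrite author's own statement) =====
-- stated objective: alternative
-- what changed: Replaces the two-level nested split (outer split on '\n', inner split on '|') with a single left-to-right character-scan state machine that accumulates the current fragment and flushes a stripped non-empty segment at every delimiter.
import Mathlib
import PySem

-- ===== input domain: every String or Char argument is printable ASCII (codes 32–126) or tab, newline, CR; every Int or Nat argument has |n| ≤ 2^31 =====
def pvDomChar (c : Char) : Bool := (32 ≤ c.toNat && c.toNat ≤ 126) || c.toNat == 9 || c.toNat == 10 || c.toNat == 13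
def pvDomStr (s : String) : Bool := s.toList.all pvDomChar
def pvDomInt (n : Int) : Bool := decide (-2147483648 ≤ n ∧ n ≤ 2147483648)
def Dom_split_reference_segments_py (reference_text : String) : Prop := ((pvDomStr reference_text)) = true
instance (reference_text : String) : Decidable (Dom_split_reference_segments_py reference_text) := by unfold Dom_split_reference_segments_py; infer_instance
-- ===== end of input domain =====

-- B replaces A's nested split('\n') / split('|') traversal by a single character-scan state
-- machine that flushes a stripped non-empty segment at each delimiter (alternative decomposition, same cost).


-- ===== PORT A =====
-- str(reference_text) is the identity on a str argument; strings are handled as List Char via PySem.Chars (exact on the ASCII domain).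
def split_reference_segments_py (reference_text : String) : List String :=
  let segments : List String :=
    (PySem.Chars.splitOn reference_text.toList ['\n']).foldl (fun segs raw_line =>
      (PySem.Chars.splitOn raw_line ['|']).foldl (fun segs part =>
        let cleaned := PySem.Chars.strip part
        if cleaned ≠ [] then segs ++ [String.ofList cleaned] else segs) segs) []
  if segments = [] then [String.ofList (PySem.Chars.strip reference_text.toList)] else segments

-- ===== PORT B =====
-- flush of the current fragment: strip it, append it to the segments if non-empty
def altFlush (cur : List Char) (acc : List String) : List String :=
  let cleaned := PySem.Chars.strip cur
  if cleaned = [] then acc else acc ++ [String.ofList cleaned]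

-- the character scan: cur = current fragment, acc = segments collected so far
def altGo : List Char → List Char → List String → List String
  | [], cur, acc => altFlush cur acc
  | ch :: rest, cur, acc =>
    if ch = '\n' ∨ ch = '|' then altGo rest [] (altFlush cur acc)
    else altGo rest (cur ++ [ch]) acc

def split_reference_segments_py_alt (reference_text : String) : List String :=
  let segments := altGo reference_text.toList [] []
  if segments = [] then [String.ofList (PySem.Chars.strip reference_text.toList)] else segments

-- ===== PRECONDITION & SPEC =====
def Spec_split_reference_segments_py (reference_text : String) (out : List String) : Prop := out = split_reference_segments_py_alt reference_text
instance (reference_text : String) (out : List String) : Decidable (Spec_split_reference_segments_py reference_text out) := by unfold Spec_split_reference_segments_py; infer_instance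

-- ===== CLAIM (what is proved, stated in full; the proofs are below) =====
def Claim_equal_split_reference_segments_py : Prop := ∀ (reference_text : String), Dom_split_reference_segments_py reference_text → Spec_split_reference_segments_py reference_text (split_reference_segments_py reference_text)

-- ===== LEMMAS AND PROOFS =====

-- one-pass split on a predicate: (first piece, later pieces)
def splitP (p : Char → Bool) : List Char → List Char × List (List Char)
  | [] => ([], [])
  | x :: rest =>
    let r := splitP p rest
    if p x then ([], r.1 :: r.2) else (x :: r.1, r.2)

def toPieces (r : List Char × List (List Char)) : List (List Char) := r.1 :: r.2

-- strip every piece, keep the non-empty ones, pack as strings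
def cleanPieces (ls : List (List Char)) : List String :=
  ((ls.map PySem.Chars.strip).filter (· ≠ [])).map String.ofList

lemma cleanPieces_cons (l : List Char) (ls : List (List Char)) :
    cleanPieces (l :: ls) =
      (if PySem.Chars.strip l = [] then [] else [String.ofList (PySem.Chars.strip l)]) ++ cleanPieces ls := by
  simp only [cleanPieces, List.map_cons, List.filter_cons]
  split_ifs with h <;> simp_all

lemma cleanPieces_append (xs ys : List (List Char)) :
    cleanPieces (xs ++ ys) = cleanPieces xs ++ cleanPieces ys := by
  simp [cleanPieces]

-- PySem.Chars.splitOn on a single-character separator computes splitP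
lemma splitOn_go_spec (c : Char) :
    ∀ (l : List Char) (fuel : Nat) (cur : List Char) (acc : List (List Char)),
      l.length < fuel →
      PySem.Chars.splitOn.go [c] fuel l cur acc =
        acc.reverse ++ (cur.reverse ++ (splitP (· == c) l).1) :: (splitP (· == c) l).2 := by
  intro l
  induction l with
  | nil =>
    intro fuel cur acc h
    match fuel with
    | fuel + 1 => simp [PySem.Chars.splitOn.go, splitP]
  | cons x rest ih =>
    intro fuel cur acc h
    simp only [List.length_cons] at h
    match fuel with
    | fuel + 1 =>
      by_cases hx : x = c
      · subst hx
        have hpre : List.isPrefixOf [x] (x :: rest) = true := by simp [List.isPrefixOf]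
        rw [PySem.Chars.splitOn.go, if_pos hpre]
        simp only [List.length_cons, List.length_nil, List.drop_succ_cons, List.drop_zero]
        rw [ih fuel [] (cur.reverse :: acc) (by omega)]
        simp [splitP]
      · have hpre : List.isPrefixOf [c] (x :: rest) = false := by
          simp [List.isPrefixOf]; exact fun h' => hx h'.symm
        rw [PySem.Chars.splitOn.go, if_neg (by simp [hpre])]
        rw [ih fuel (x :: cur) acc (by omega)]
        simp [splitP, hx]

lemma splitOn_eq_splitP (c : Char) (s : List Char) :
    PySem.Chars.splitOn s [c] = toPieces (splitP (· == c) s) := by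
  rw [PySem.Chars.splitOn, splitOn_go_spec c s (s.length + 1) [] [] (by omega)]
  simp [toPieces]

-- splitting on '\n' and then every line on '|' is splitting on either delimiter
lemma nest_split (cs : List Char) :
    (toPieces (splitP (· == '\n') cs)).flatMap (fun l => toPieces (splitP (· == '|') l)) =
      toPieces (splitP (fun c => c == '\n' || c == '|') cs) := by
  induction cs with
  | nil => simp [splitP, toPieces]
  | cons x rest ih =>
    simp only [toPieces, List.flatMap_cons] at ih ⊢
    by_cases hnl : x = '\n'
    · subst hnl
      simp only [splitP, beq_self_eq_true, Bool.true_or, if_pos]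
      simp only [List.flatMap_cons] at ih ⊢
      simp [ih]
    · by_cases hbar : x = '|'
      · subst hbar
        have hx : (('|' : Char) == '\n') = false := by decide
        simp only [splitP, hx, Bool.false_eq_true, if_false, beq_self_eq_true, Bool.or_true, if_true]
        rw [List.cons_append, ih]
      · have h1 : (x == '\n') = false := by simp [hnl]
        have h2 : (x == '|') = false := by simp [hbar]
        simp only [splitP, h1, h2, Bool.false_or, Bool.false_eq_true, if_false]
        rw [List.cons_append] at ih ⊢
        injection ih with ha hb
        rw [ha, hb]

-- B's scan collects cleanPieces of the combined split
lemma altGo_spec :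
    ∀ (cs cur : List Char) (acc : List String),
      altGo cs cur acc =
        acc ++ cleanPieces ((cur ++ (splitP (fun c => c == '\n' || c == '|') cs).1)
                              :: (splitP (fun c => c == '\n' || c == '|') cs).2) := by
  intro cs
  induction cs with
  | nil =>
    intro cur acc
    simp only [altGo, splitP, List.append_nil]
    rw [cleanPieces_cons]
    simp only [cleanPieces, List.map_nil, List.filter_nil, List.append_nil]
    unfold altFlush
    split_ifs with h <;> simp [h]
  | cons x rest ih =>
    intro cur acc
    by_cases hx : x = '\n' ∨ x = '|'
    · rw [altGo, if_pos hx, ih]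
      have hx' : (x == '\n' || x == '|') = true := by
        rcases hx with h | h <;> simp [h]
      simp only [splitP, hx', if_pos, List.nil_append, List.append_nil]
      simp only [cleanPieces_cons]
      unfold altFlush
      split_ifs <;> simp_all
    · rw [altGo, if_neg hx, ih]
      have hx' : (x == '\n' || x == '|') = false := by
        simp only [not_or] at hx; simp [hx.1, hx.2]
      simp [splitP, hx']
  
-- the inner foldl of A collects cleanPieces
lemma innerFold_spec (parts : List (List Char)) :
    ∀ segs : List String,
      parts.foldl (fun segs part =>
        let cleaned := PySem.Chars.strip part
        if cleaned ≠ [] then segs ++ [String.ofList cleaned] else segs) segs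
      = segs ++ cleanPieces parts := by
  induction parts with
  | nil => intro segs; simp [cleanPieces]
  | cons p ps ih =>
    intro segs
    rw [List.foldl_cons, ih, cleanPieces_cons]
    by_cases h : PySem.Chars.strip p = [] <;> simp [h]

-- A's nested loops collect cleanPieces of the combined split
lemma a_segments_eq (cs : List Char) :
    (PySem.Chars.splitOn cs ['\n']).foldl (fun segs raw_line =>
      (PySem.Chars.splitOn raw_line ['|']).foldl (fun segs part =>
        let cleaned := PySem.Chars.strip part
        if cleaned ≠ [] then segs ++ [String.ofList cleaned] else segs) segs) []
    = cleanPieces (toPieces (splitP (fun c => c == '\n' || c == '|') cs)) := by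
  have houter :
      ∀ (lines : List (List Char)) (segs : List String),
        lines.foldl (fun segs raw_line =>
          (PySem.Chars.splitOn raw_line ['|']).foldl (fun segs part =>
            let cleaned := PySem.Chars.strip part
            if cleaned ≠ [] then segs ++ [String.ofList cleaned] else segs) segs) segs
        = segs ++ cleanPieces (lines.flatMap (fun l => toPieces (splitP (· == '|') l))) := by
    intro lines
    induction lines with
    | nil => intro segs; simp [cleanPieces]
    | cons l ls ih =>
      intro segs
      rw [List.foldl_cons, splitOn_eq_splitP, innerFold_spec, ih,
        List.flatMap_cons, cleanPieces_append, List.append_assoc]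
  rw [splitOn_eq_splitP, houter, List.nil_append, nest_split]

-- ===== VERDICT (by name: the statement is the Claim_ definition above) =====
theorem split_reference_segments_py_spec : Claim_equal_split_reference_segments_py := by
  intro s _
  unfold Spec_split_reference_segments_py split_reference_segments_py split_reference_segments_py_alt
  rw [a_segments_eq, altGo_spec]
  simp [toPieces]
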